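-- pv_equiv track=rewrite | github.com/ans036/Bengali-Assistive-Reader | backend/app/utils/tts.py | convert_digits_to_bengali
-- ===== SOURCE A (Python) =====
-- def convert_digits_to_bengali(txt):
--     mapping = {
--         "0": "০",
--         "1": "১",
--         "2": "২",
--         "3": "৩",
--         "4": "৪",
--         "5": "৫",
--         "6": "৬",
--         "7": "৭",
--         "8": "৮",
--         "9": "৯"
--     }
--     for en_digit, bn_digit in mapping.items():
--         txt = txt.replace(en_digit, bn_digit)
--     return txt
-- ===== SOURCE B (Python) =====
-- def convert_digits_to_bengali(txt):
--     # Bengali digits are a contiguous Unicode block starting at U+09E6,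
--     # so each ASCII digit maps by a fixed code-point offset; no table needed.
--     out = []
--     for c in txt:
--         out.append(chr(0x09E6 + ord(c) - 48) if '0' <= c <= '9' else c)
--     return ''.join(out)
-- ===== Notes on version B (the rewrite author's own statement) =====
-- stated objective: simpler
-- what changed: B drops the digit dictionary and A's ten whole-string replace passes entirely: one scan over the characters maps each ASCII digit to the Bengali digit by the fixed Unicode code-point offset (Bengali zero minus ASCII zero), passing every other character through.
import Mathlib
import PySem

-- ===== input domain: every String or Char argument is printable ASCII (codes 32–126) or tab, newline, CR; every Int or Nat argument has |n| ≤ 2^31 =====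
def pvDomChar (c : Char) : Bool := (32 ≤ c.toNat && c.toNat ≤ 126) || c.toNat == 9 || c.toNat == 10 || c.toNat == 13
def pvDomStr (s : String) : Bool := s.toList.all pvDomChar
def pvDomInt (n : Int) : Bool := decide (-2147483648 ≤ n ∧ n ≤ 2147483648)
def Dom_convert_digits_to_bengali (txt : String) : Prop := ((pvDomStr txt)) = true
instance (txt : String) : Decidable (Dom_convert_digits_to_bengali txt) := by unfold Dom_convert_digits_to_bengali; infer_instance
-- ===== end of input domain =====

-- B drops A's digit dictionary and its ten whole-string replace passes: one scan computes each
-- Bengali digit arithmetically by the fixed code-point offset 0x09E6 - 48.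

-- ===== PORT A =====
-- the dict literal of A, in insertion order
def pvMappingA : PySem.Dict String String :=
  PySem.Dict.ofList [("0", "০"), ("1", "১"), ("2", "২"), ("3", "৩"), ("4", "৪"),
                     ("5", "৫"), ("6", "৬"), ("7", "৭"), ("8", "৮"), ("9", "৯")]

def convert_digits_to_bengali (txt : String) : String :=
  (PySem.Dict.items pvMappingA).foldl (fun t p => PySem.Str.replace t p.1 p.2) txt

-- ===== PORT B =====
-- the loop body of Source B: out.append(chr(0x09E6 + ord(c) - 48) if '0' <= c <= '9' else c)
def pvAltGo : List Char → List Char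
  | [] => []
  | c :: t =>
      (if '0' ≤ c ∧ c ≤ '9' then Char.ofNat (0x09E6 + c.toNat - 48) else c) :: pvAltGo t

def convert_digits_to_bengali_alt (txt : String) : String :=
  String.ofList (pvAltGo txt.toList)

-- ===== PRECONDITION & SPEC =====
def Spec_convert_digits_to_bengali (txt : String) (out : String) : Prop := out = convert_digits_to_bengali_alt txt
instance (txt : String) (out : String) : Decidable (Spec_convert_digits_to_bengali txt out) := by unfold Spec_convert_digits_to_bengali; infer_instance

-- ===== CLAIM (what is proved, stated in full; the proofs are below) =====
def Claim_equal_convert_digits_to_bengali : Prop := ∀ (txt : String), Dom_convert_digits_to_bengali txt → Spec_convert_digits_to_bengali txt (convert_digits_to_bengali txt)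

-- ===== LEMMAS AND PROOFS =====

-- the per-character substitution both programs implement
def pvF (c : Char) : Char :=
  if c = '0' then '০' else if c = '1' then '১' else if c = '2' then '২' else
  if c = '3' then '৩' else if c = '4' then '৪' else if c = '5' then '৫' else
  if c = '6' then '৬' else if c = '7' then '৭' else if c = '8' then '৮' else
  if c = '9' then '৯' else c

lemma replace_go_single (d b : Char) :
    ∀ (l acc : List Char) (fuel : Nat), l.length ≤ fuel →
      PySem.Chars.replace.go [d] [b] fuel l acc
        = acc.reverse ++ l.map (fun c => if c = d then b else c) := by
  intro l
  induction l with
  | nil =>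
      intro acc fuel _
      cases fuel <;> simp [PySem.Chars.replace.go]
  | cons c t ih =>
      intro acc fuel h
      cases fuel with
      | zero => simp at h
      | succ n =>
        simp only [PySem.Chars.replace.go]
        by_cases hc : c = d
        · subst hc
          simp [List.isPrefixOf, ih _ n (by simpa using h)]
        · have hpre : List.isPrefixOf [d] (c :: t) = false := by
            simp [List.isPrefixOf]
            exact fun h' => hc h'.symm
          simp [hpre, hc, ih _ n (by simpa using h)]

lemma replace_single (d b : Char) (l : List Char) :
    PySem.Chars.replace l [d] [b] = l.map (fun c => if c = d then b else c) := by
  simp [PySem.Chars.replace, replace_go_single d b l [] l.length le_rfl]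

def pvCharPairs : List (Char × Char) :=
  [('0', '০'), ('1', '১'), ('2', '২'), ('3', '৩'), ('4', '৪'),
   ('5', '৫'), ('6', '৬'), ('7', '৭'), ('8', '৮'), ('9', '৯')]

lemma foldl_map_subst (ps : List (Char × Char)) :
    ∀ t : String,
      ps.foldl (fun t q => String.ofList (t.toList.map (fun c => if c = q.1 then q.2 else c))) t
        = String.ofList (t.toList.map (fun c =>
            ps.foldl (fun x q => if x = q.1 then q.2 else x) c)) := by
  induction ps with
  | nil => intro t; simp
  | cons q ps ih =>
      intro t
      rw [List.foldl_cons, ih]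
      simp only [String.toList_ofList, List.map_map, Function.comp_def, List.foldl_cons]

lemma A_eq_map (txt : String) :
    convert_digits_to_bengali txt = String.ofList (txt.toList.map pvF) := by
  have hitems : PySem.Dict.items pvMappingA
      = pvCharPairs.map (fun q => (String.ofList [q.1], String.ofList [q.2])) := rfl
  rw [convert_digits_to_bengali, hitems, List.foldl_map]
  have hstep : (fun (t : String) (q : Char × Char) =>
        PySem.Str.replace t (String.ofList [q.1]) (String.ofList [q.2]))
      = fun t q => String.ofList (t.toList.map (fun c => if c = q.1 then q.2 else c)) := by
    funext t q
    simp [PySem.Str.replace, replace_single]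
  rw [hstep, foldl_map_subst]
  refine congrArg String.ofList (List.map_congr_left (fun c _ => ?_))
  by_cases h0 : c = '0'; · subst h0; decide
  by_cases h1 : c = '1'; · subst h1; decide
  by_cases h2 : c = '2'; · subst h2; decide
  by_cases h3 : c = '3'; · subst h3; decide
  by_cases h4 : c = '4'; · subst h4; decide
  by_cases h5 : c = '5'; · subst h5; decide
  by_cases h6 : c = '6'; · subst h6; decide
  by_cases h7 : c = '7'; · subst h7; decide
  by_cases h8 : c = '8'; · subst h8; decide
  by_cases h9 : c = '9'; · subst h9; decide
  simp [pvCharPairs, pvF, h0, h1, h2, h3, h4, h5, h6, h7, h8, h9]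

set_option maxRecDepth 4000 in
lemma altGo_step (c : Char) :
    (if '0' ≤ c ∧ c ≤ '9' then Char.ofNat (0x09E6 + c.toNat - 48) else c) = pvF c := by
  by_cases hd : '0' ≤ c ∧ c ≤ '9'
  · have h1 : 48 ≤ c.toNat := by
      have h := hd.1; rw [Char.le_def, UInt32.le_iff_toNat_le] at h; exact h
    have h2 : c.toNat ≤ 57 := by
      have h := hd.2; rw [Char.le_def, UInt32.le_iff_toNat_le] at h; exact h
    have hten : c.toNat = 48 ∨ c.toNat = 49 ∨ c.toNat = 50 ∨ c.toNat = 51 ∨ c.toNat = 52 ∨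
        c.toNat = 53 ∨ c.toNat = 54 ∨ c.toNat = 55 ∨ c.toNat = 56 ∨ c.toNat = 57 := by omega
    have hc : c = Char.ofNat c.toNat := (Char.ofNat_toNat c).symm
    rcases hten with h|h|h|h|h|h|h|h|h|h <;>
      (rw [h] at hc; subst hc; decide)
  · have h1 : ¬(48 ≤ c.toNat ∧ c.toNat ≤ 57) := by
      rintro ⟨a1, a2⟩
      refine hd ⟨?_, ?_⟩ <;> rw [Char.le_def, UInt32.le_iff_toNat_le]
      · exact a1
      · exact a2
    have e0 : c ≠ '0' := fun he => h1 (by subst he; decide)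
    have e1 : c ≠ '1' := fun he => h1 (by subst he; decide)
    have e2 : c ≠ '2' := fun he => h1 (by subst he; decide)
    have e3 : c ≠ '3' := fun he => h1 (by subst he; decide)
    have e4 : c ≠ '4' := fun he => h1 (by subst he; decide)
    have e5 : c ≠ '5' := fun he => h1 (by subst he; decide)
    have e6 : c ≠ '6' := fun he => h1 (by subst he; decide)
    have e7 : c ≠ '7' := fun he => h1 (by subst he; decide)
    have e8 : c ≠ '8' := fun he => h1 (by subst he; decide)
    have e9 : c ≠ '9' := fun he => h1 (by subst he; decide)
    simp [pvF, hd, e0, e1, e2, e3, e4, e5, e6, e7, e8, e9]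

lemma B_eq_map (txt : String) :
    convert_digits_to_bengali_alt txt = String.ofList (txt.toList.map pvF) := by
  rw [convert_digits_to_bengali_alt]
  congr 1
  induction txt.toList with
  | nil => rfl
  | cons c t ih => rw [pvAltGo, List.map_cons, ih, altGo_step]

-- ===== VERDICT (by name: the statement is the Claim_ definition above) =====
theorem convert_digits_to_bengali_spec : Claim_equal_convert_digits_to_bengali := by
  intro txt _
  show convert_digits_to_bengali txt = convert_digits_to_bengali_alt txt
  rw [A_eq_map, B_eq_map]
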